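-- pv_equiv track=rewrite | github.com/suellenferraz/Python | 2024.2/Lista/CAP 5/5.4.py | calcular_bonificacao
-- ===== SOURCE A (Python) =====
-- def calcular_bonificacao(medalhas, recorde_mundial, primeira_medalha_pais): # Função que calcula a bonificação com 3 parâmetros, medalhas, recorde_mundial e primeira_medalha_pais.
--     bonificacao = 0 # Variável que armazena a bonificação inicialmente como 0, porque não temos nenhuma medalha.
--     # Laço que percorre a lista de medalhas.
--     for medalha in medalhas: # Para cada medalha na lista de medalhas.
--         if medalha.lower() == "ouro": # Se a medalha for de ouro.
--             bonificacao += 50000 # Adiciona 50000 à bonificação.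
--         elif medalha.lower() == "prata": # Se a medalha for de prata.
--             bonificacao += 30000 # Adiciona 30000 à bonificação.
--         elif medalha.lower() == "bronze": # Se a medalha for de bronze.
--             bonificacao += 10000 # Adiciona 10000 à bonificação.
--     # Condição que verifica se o recorde mundial é sim.
--     if recorde_mundial.lower() == "sim": # Se o recorde mundial for sim.
--         bonificacao += 100000 # Adiciona 100000 à bonificação.
--     if primeira_medalha_pais.lower() == "sim": # Se a primeira medalha do país for sim.
--         bonificacao += 50000 # Adiciona 50000 à bonificação.
--
--     return bonificacao # Retorna a bonificação.
-- ===== SOURCE B (Python) =====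
-- def calcular_bonificacao(medalhas, recorde_mundial, primeira_medalha_pais):
--     # Staged passes: lowercase once, then count each medal kind with list.count;
--     # flag bonuses come from a table filtered by "sim".
--     baixas = [m.lower() for m in medalhas]
--     total = (50000 * baixas.count("ouro")
--              + 30000 * baixas.count("prata")
--              + 10000 * baixas.count("bronze"))
--     extras = [(recorde_mundial, 100000), (primeira_medalha_pais, 50000)]
--     total += sum(valor for resposta, valor in extras if resposta.lower() == "sim")
--     return total
-- ===== Notes on version B (the rewrite author's own statement) =====
-- stated objective: idiomatic
-- what changed: Replaces the single branch-per-element accumulation loop with staged library passes: lowercase the list once, take three list.count passes with fixed weights, and sum the flag bonuses from a filtered (answer, value) table.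
import Mathlib
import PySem

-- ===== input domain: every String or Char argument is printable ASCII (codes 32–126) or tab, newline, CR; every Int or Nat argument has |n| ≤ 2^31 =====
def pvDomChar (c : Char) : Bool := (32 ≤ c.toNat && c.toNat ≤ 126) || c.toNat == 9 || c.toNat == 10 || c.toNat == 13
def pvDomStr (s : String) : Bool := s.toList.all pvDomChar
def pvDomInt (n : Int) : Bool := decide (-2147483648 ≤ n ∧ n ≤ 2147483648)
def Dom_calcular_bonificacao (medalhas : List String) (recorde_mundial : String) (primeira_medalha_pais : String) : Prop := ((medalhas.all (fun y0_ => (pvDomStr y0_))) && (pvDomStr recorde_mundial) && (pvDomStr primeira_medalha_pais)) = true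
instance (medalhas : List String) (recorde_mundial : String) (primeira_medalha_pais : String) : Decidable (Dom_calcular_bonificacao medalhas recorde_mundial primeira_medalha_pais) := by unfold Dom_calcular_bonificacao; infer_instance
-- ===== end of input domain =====

-- B replaces A's branch-per-element loop with staged library passes (lowercase once, three list.count passes, flags summed from a filtered table); idiomatic, same cost.


-- ===== PORT A =====
def calcular_bonificacao (medalhas : List String) (recorde_mundial : String) (primeira_medalha_pais : String) : Int :=
  let bonificacao : Int := medalhas.foldl (fun bonificacao medalha =>
    if PySem.Str.lower medalha == "ouro" then bonificacao + 50000
    else if PySem.Str.lower medalha == "prata" then bonificacao + 30000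
    else if PySem.Str.lower medalha == "bronze" then bonificacao + 10000
    else bonificacao) 0
  let bonificacao := if PySem.Str.lower recorde_mundial == "sim" then bonificacao + 100000 else bonificacao
  let bonificacao := if PySem.Str.lower primeira_medalha_pais == "sim" then bonificacao + 50000 else bonificacao
  bonificacao

-- ===== PORT B =====
def calcular_bonificacao_alt (medalhas : List String) (recorde_mundial : String) (primeira_medalha_pais : String) : Int :=
  let baixas := medalhas.map PySem.Str.lower
  let total : Int := 50000 * (PySem.List.count baixas "ouro" : Int)
                   + 30000 * (PySem.List.count baixas "prata" : Int)
                   + 10000 * (PySem.List.count baixas "bronze" : Int)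
  let extras : List (String × Int) := [(recorde_mundial, 100000), (primeira_medalha_pais, 50000)]
  total + (((extras.filter (fun p => PySem.Str.lower p.1 == "sim")).map (fun p => p.2)).sum)

-- ===== PRECONDITION & SPEC =====
def Spec_calcular_bonificacao (medalhas : List String) (recorde_mundial : String) (primeira_medalha_pais : String) (out : Int) : Prop := out = calcular_bonificacao_alt medalhas recorde_mundial primeira_medalha_pais
instance (medalhas : List String) (recorde_mundial : String) (primeira_medalha_pais : String) (out : Int) : Decidable (Spec_calcular_bonificacao medalhas recorde_mundial primeira_medalha_pais out) := by unfold Spec_calcular_bonificacao; infer_instance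

-- ===== CLAIM =====
def Claim_equal_calcular_bonificacao : Prop := ∀ (medalhas : List String) (recorde_mundial : String) (primeira_medalha_pais : String), Dom_calcular_bonificacao medalhas recorde_mundial primeira_medalha_pais → Spec_calcular_bonificacao medalhas recorde_mundial primeira_medalha_pais (calcular_bonificacao medalhas recorde_mundial primeira_medalha_pais)

-- ===== LEMMAS AND PROOFS =====
-- A's branch-accumulating fold from any start equals start + 50000·#ouro + 30000·#prata + 10000·#bronze (counts over the lowercased list)
theorem foldA_eq_counts (l : List String) (a : Int) :
    l.foldl (fun bonificacao medalha =>
      if PySem.Str.lower medalha == "ouro" then bonificacao + 50000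
      else if PySem.Str.lower medalha == "prata" then bonificacao + 30000
      else if PySem.Str.lower medalha == "bronze" then bonificacao + 10000
      else bonificacao) a
    = a + 50000 * ((l.map PySem.Str.lower).count "ouro" : Int)
        + 30000 * ((l.map PySem.Str.lower).count "prata" : Int)
        + 10000 * ((l.map PySem.Str.lower).count "bronze" : Int) := by
  induction l generalizing a with
  | nil => simp
  | cons x xs ih =>
    simp only [List.foldl_cons, List.map_cons, ih]
    by_cases h1 : PySem.Str.lower x = "ouro"
    · simp [h1, List.count_cons]; ring
    · by_cases h2 : PySem.Str.lower x = "prata"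
      · simp [h1, h2, List.count_cons]; ring
      · by_cases h3 : PySem.Str.lower x = "bronze"
        · simp [h1, h2, h3, List.count_cons]; ring
        · simp [h1, h2, h3, List.count_cons]

-- ===== VERDICT =====
theorem calcular_bonificacao_spec : Claim_equal_calcular_bonificacao := by
  intro medalhas recorde primeira _
  unfold Spec_calcular_bonificacao calcular_bonificacao calcular_bonificacao_alt
  simp only [foldA_eq_counts, PySem.List.count_eq, List.filter_cons, List.filter_nil]
  by_cases h1 : PySem.Str.lower recorde == "sim" <;>
    by_cases h2 : PySem.Str.lower primeira == "sim" <;>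
      simp [h1, h2] <;> ring
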